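-- pv_equiv track=rewrite | github.com/stemesghen/AI_Agent_test | run.py | region_to_iso2_candidates
-- ===== SOURCE A (Python) =====
-- from typing import Dict, Any, List, Tuple, Set, Optional
--
-- def region_to_iso2_candidates(regions_text: List[str], region_centroids: Dict[str, Any]) -> List[str]:
--     out: List[str] = []
--     seen: Set[str] = set()
--     for r in regions_text or []:
--         entry = region_centroids.get(r) or {}
--         for iso2 in entry.get("countries", []):
--             if iso2 and iso2 not in seen:
--                 out.append(iso2)
--                 seen.add(iso2)
--     return out
-- ===== SOURCE B (Python) =====
-- def region_to_iso2_candidates(regions_text, region_centroids):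
--     flat = []
--     for r in regions_text or []:
--         flat.extend(region_centroids.get(r, {}).get("countries", []))
--     return [x for i, x in enumerate(flat) if x and x not in flat[:i]]
-- ===== Notes on version B (the rewrite author's own statement) =====
-- stated objective: alternative
-- what changed: B keeps no seen-set or dict at all: it first concatenates every region's raw country list into one flat list, then keeps each truthy element exactly when it does not occur in the input prefix flat[:i] before it, deduplicating by prefix membership on the input instead of a maintained accumulator.
import Mathlib
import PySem

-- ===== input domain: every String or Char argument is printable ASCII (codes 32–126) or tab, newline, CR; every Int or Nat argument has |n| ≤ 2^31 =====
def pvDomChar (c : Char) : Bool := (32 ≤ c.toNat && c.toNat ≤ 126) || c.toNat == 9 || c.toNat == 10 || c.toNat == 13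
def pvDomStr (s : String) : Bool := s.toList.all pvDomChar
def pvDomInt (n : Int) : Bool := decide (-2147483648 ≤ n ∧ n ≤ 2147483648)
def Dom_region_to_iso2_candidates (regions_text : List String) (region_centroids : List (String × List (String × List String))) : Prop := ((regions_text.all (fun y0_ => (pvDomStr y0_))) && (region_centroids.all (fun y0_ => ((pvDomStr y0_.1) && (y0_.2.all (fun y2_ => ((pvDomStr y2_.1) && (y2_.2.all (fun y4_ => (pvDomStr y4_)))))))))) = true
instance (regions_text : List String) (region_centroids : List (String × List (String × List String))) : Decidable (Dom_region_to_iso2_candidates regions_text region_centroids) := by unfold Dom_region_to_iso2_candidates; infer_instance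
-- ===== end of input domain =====

-- B drops A's maintained seen-set: it concatenates all raw country lists into one flat list, then
-- keeps each truthy element iff it does not occur in the input prefix flat[:i] before it; same result.

-- ===== PORT A =====
-- body of A's outer loop: `entry = region_centroids.get(r) or {}` (None/empty dict both give {}),
-- then the inner loop over entry.get("countries", []) with the seen-set conditional append.
def pvStepA (region_centroids : List (String × List (String × List String)))
    (st : List String × PySem.Set String) (r : String) : List String × PySem.Set String :=
  let entry : List (String × List String) :=
    match region_centroids.lookup r with
    | some e => if e.isEmpty then [] else e
    | none => []
  let countries : List String := (entry.lookup "countries").getD []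
  countries.foldl
    (fun (st2 : List String × PySem.Set String) iso2 =>
      if iso2 ≠ "" ∧ iso2 ∉ st2.2 then (st2.1 ++ [iso2], PySem.Set.add st2.2 iso2) else st2)
    st

def region_to_iso2_candidates (regions_text : List String) (region_centroids : List (String × List (String × List String))) : List String :=
  (regions_text.foldl (pvStepA region_centroids) ([], PySem.Set.empty)).1

-- ===== PORT B =====
-- port of Source B: build flat by extending with region_centroids.get(r, {}).get("countries", []),
-- then the comprehension [x for i, x in enumerate(flat) if x and x not in flat[:i]].
def region_to_iso2_candidates_alt (regions_text : List String) (region_centroids : List (String × List (String × List String))) : List String :=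
  let flat : List String := regions_text.foldl
    (fun acc r => acc ++ ((((region_centroids.lookup r).getD []).lookup "countries").getD [])) []
  (PySem.List.enumerate flat).foldl
    (fun out p => if p.2 ≠ "" ∧ p.2 ∉ PySem.List.slice flat none (some p.1) then out ++ [p.2] else out) []

-- ===== PRECONDITION & SPEC =====
def Spec_region_to_iso2_candidates (regions_text : List String) (region_centroids : List (String × List (String × List String))) (out : List String) : Prop := out = region_to_iso2_candidates_alt regions_text region_centroids
instance (regions_text : List String) (region_centroids : List (String × List (String × List String))) (out : List String) : Decidable (Spec_region_to_iso2_candidates regions_text region_centroids out) := by unfold Spec_region_to_iso2_candidates; infer_instance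

-- ===== CLAIM (what is proved, stated in full; the proofs are below) =====
def Claim_equal_region_to_iso2_candidates : Prop := ∀ (regions_text : List String) (region_centroids : List (String × List (String × List String))), Dom_region_to_iso2_candidates regions_text region_centroids → Spec_region_to_iso2_candidates regions_text region_centroids (region_to_iso2_candidates regions_text region_centroids)

-- ===== LEMMAS AND PROOFS =====

-- a region's raw (unfiltered) country list
def pvRaw (region_centroids : List (String × List (String × List String))) (r : String) : List String :=
  (((region_centroids.lookup r).getD []).lookup "countries").getD []

-- its truthy elements (A's per-region contribution)
def pvCnt (region_centroids : List (String × List (String × List String))) (r : String) : List String :=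
  (pvRaw region_centroids r).filter (fun iso2 => iso2 ≠ "")

-- A's inner loop on a synchronized state (out = seen) stays synchronized and
-- computes the conditional Set.add fold over the truthy elements.
lemma pv_inner (l : List String) (s : List String) :
    l.foldl
      (fun (st2 : List String × PySem.Set String) iso2 =>
        if iso2 ≠ "" ∧ iso2 ∉ st2.2 then (st2.1 ++ [iso2], PySem.Set.add st2.2 iso2) else st2)
      (s, s)
    = ((l.filter (fun iso2 => iso2 ≠ "")).foldl PySem.Set.add s,
       (l.filter (fun iso2 => iso2 ≠ "")).foldl PySem.Set.add s) := by
  induction l generalizing s with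
  | nil => simp
  | cons x l ih =>
    by_cases hx : x = ""
    · subst hx; simpa using ih s
    · by_cases hm : x ∈ s
      · simpa [List.foldl_cons, hx, hm, PySem.Set.add_of_mem hm] using ih s
      · simpa [List.foldl_cons, hx, hm, PySem.Set.add_of_not_mem hm] using ih (s ++ [x])

-- A's `entry.get("countries", [])` after `get(r) or {}` equals the chained getD form.
lemma pv_countries_eq (region_centroids : List (String × List (String × List String))) (r : String) :
    (((match region_centroids.lookup r with
       | some e => if e.isEmpty then ([] : List (String × List String)) else e
       | none => []).lookup "countries").getD [])
    = pvRaw region_centroids r := by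
  unfold pvRaw
  cases h : region_centroids.lookup r with
  | none => rfl
  | some e => cases e <;> rfl

-- A's outer loop from a synchronized state computes a fold of the per-region Set.add folds.
lemma pv_outer (region_centroids : List (String × List (String × List String)))
    (rt : List String) (s : List String) :
    rt.foldl (pvStepA region_centroids) (s, s)
    = (rt.foldl (fun s r => (pvCnt region_centroids r).foldl PySem.Set.add s) s,
       rt.foldl (fun s r => (pvCnt region_centroids r).foldl PySem.Set.add s) s) := by
  induction rt generalizing s with
  | nil => rfl
  | cons r rt ih =>
    simp only [List.foldl_cons, pvStepA, pv_countries_eq, pvCnt]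
    rw [pv_inner]
    exact ih _

-- folding Set.add over a flatMap = folding the per-piece folds.
lemma pv_foldl_flatMap (f : String → List String) (rt : List String) (s : List String) :
    (rt.flatMap f).foldl PySem.Set.add s
    = rt.foldl (fun s r => (f r).foldl PySem.Set.add s) s := by
  induction rt generalizing s with
  | nil => rfl
  | cons r rt ih => simp [List.flatMap_cons, List.foldl_append, ih]

-- ordered dedup of a snoc
lemma pv_dedup_snoc (l : List String) (x : String) :
    PySem.List.dedup (l ++ [x]) = if x ∈ l then PySem.List.dedup l else PySem.List.dedup l ++ [x] := by
  rw [PySem.List.dedup_eq_ofList, PySem.List.dedup_eq_ofList,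
      PySem.Set.ofList_eq_foldl, PySem.Set.ofList_eq_foldl, List.foldl_append]
  by_cases hm : x ∈ l
  · have h2 : x ∈ PySem.Set.ofList l := by rw [PySem.Set.mem_ofList]; exact hm
    rw [PySem.Set.ofList_eq_foldl] at h2
    simp [List.foldl_cons, PySem.Set.add_of_mem h2, hm]
  · have h2 : x ∉ PySem.Set.ofList l := by rw [PySem.Set.mem_ofList]; exact hm
    rw [PySem.Set.ofList_eq_foldl] at h2
    simp [List.foldl_cons, PySem.Set.add_of_not_mem h2, hm]

-- B's comprehension over enumerate flat, started after a processed prefix,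
-- extends the dedup of the prefix's truthy part to that of the whole list.
lemma pv_comp (flat : List String) : ∀ (suf pre : List String), flat = pre ++ suf →
    (PySem.List.enumerate suf (pre.length : Int)).foldl
      (fun out p => if p.2 ≠ "" ∧ p.2 ∉ PySem.List.slice flat none (some p.1) then out ++ [p.2] else out)
      (PySem.List.dedup (pre.filter (fun x => x ≠ "")))
    = PySem.List.dedup (flat.filter (fun x => x ≠ "")) := by
  intro suf
  induction suf with
  | nil => intro pre h; simp [PySem.List.enumerate_nil, h]
  | cons x suf ih =>
    intro pre h
    rw [PySem.List.enumerate_cons, List.foldl_cons]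
    have hslice : PySem.List.slice flat none (some ((pre.length : Nat) : Int)) = pre := by
      rw [PySem.List.slice_to_natCast, h, List.take_left]
    have hlen : ((pre.length : Int) + 1) = (((pre ++ [x]).length : Nat) : Int) := by
      simp
    have happ : flat = (pre ++ [x]) ++ suf := by simp [h]
    have hnext := ih (pre ++ [x]) happ
    rw [hlen]
    by_cases hx : x = ""
    · have hf : (pre ++ [x]).filter (fun x => x ≠ "") = pre.filter (fun x => x ≠ "") := by
        simp [List.filter_append, hx]
      rw [hf] at hnext
      simpa [hx] using hnext
    · have hf : (pre ++ [x]).filter (fun x => x ≠ "") = pre.filter (fun x => x ≠ "") ++ [x] := by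
        simp [List.filter_append, hx]
      by_cases hm : x ∈ pre
      · have hmem : x ∈ pre.filter (fun x => x ≠ "") := List.mem_filter.2 ⟨hm, by simp [hx]⟩
        have hd : PySem.List.dedup ((pre ++ [x]).filter (fun x => x ≠ ""))
            = PySem.List.dedup (pre.filter (fun x => x ≠ "")) := by
          rw [hf, pv_dedup_snoc, if_pos hmem]
        rw [hd] at hnext
        simpa [hx, hslice, hm] using hnext
      · have hmem : x ∉ pre.filter (fun x => x ≠ "") := fun hc => hm (List.mem_filter.1 hc).1
        have hd : PySem.List.dedup ((pre ++ [x]).filter (fun x => x ≠ ""))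
            = PySem.List.dedup (pre.filter (fun x => x ≠ "")) ++ [x] := by
          rw [hf, pv_dedup_snoc, if_neg hmem]
        rw [hd] at hnext
        simpa [hx, hslice, hm] using hnext

-- filter distributes over flatMap
lemma pv_filter_flatMap (f : String → List String) (p : String → Bool) (rt : List String) :
    (rt.flatMap f).filter p = rt.flatMap (fun r => (f r).filter p) := by
  induction rt with
  | nil => rfl
  | cons r rt ih => simp [List.flatMap_cons, List.filter_append, ih]

-- B's flat list is the flatMap of the raw per-region lists
lemma pv_flat_aux (region_centroids : List (String × List (String × List String)))
    (rt : List String) (acc : List String) :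
    rt.foldl (fun acc r => acc ++ pvRaw region_centroids r) acc
    = acc ++ rt.flatMap (pvRaw region_centroids) := by
  induction rt generalizing acc with
  | nil => simp
  | cons r rt ih => simp [List.foldl_cons, List.flatMap_cons, ih]

-- ===== VERDICT (by name: the statement is the Claim_ definition above) =====
theorem region_to_iso2_candidates_spec : Claim_equal_region_to_iso2_candidates := by
  intro rt rc _
  show region_to_iso2_candidates rt rc = region_to_iso2_candidates_alt rt rc
  have hA : region_to_iso2_candidates rt rc = PySem.Set.ofList (rt.flatMap (pvCnt rc)) := by
    unfold region_to_iso2_candidates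
    show (rt.foldl (pvStepA rc) (([] : List String), ([] : List String))).1 = _
    rw [pv_outer, PySem.Set.ofList_eq_foldl, pv_foldl_flatMap]
  have hflat : rt.foldl (fun acc r => acc ++ ((((rc.lookup r).getD []).lookup "countries").getD [])) []
      = rt.flatMap (pvRaw rc) := pv_flat_aux rc rt []
  have hB : region_to_iso2_candidates_alt rt rc
      = PySem.List.dedup ((rt.flatMap (pvRaw rc)).filter (fun x => x ≠ "")) := by
    unfold region_to_iso2_candidates_alt
    show (PySem.List.enumerate (rt.foldl (fun acc r => acc ++ ((((rc.lookup r).getD []).lookup "countries").getD [])) [])).foldl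
        (fun out p => if p.2 ≠ "" ∧ p.2 ∉ PySem.List.slice (rt.foldl (fun acc r => acc ++ ((((rc.lookup r).getD []).lookup "countries").getD [])) []) none (some p.1) then out ++ [p.2] else out)
        [] = _
    rw [hflat]
    have hcomp := pv_comp (rt.flatMap (pvRaw rc)) (rt.flatMap (pvRaw rc)) [] (by simp)
    simpa using hcomp
  rw [hA, hB, PySem.List.dedup_eq_ofList, pv_filter_flatMap]
  rfl
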